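-- pv_equiv track=rewrite | github.com/Hank421/2025Trojan | parser.py | bfs
-- ===== SOURCE A (Python) =====
-- from collections import defaultdict, deque
--
-- def bfs(source_set, graph):
--     visited = {}
--     queue = deque((s, 0) for s in source_set)
--     while queue:
--         node, level = queue.popleft()
--         if node in visited:
--             continue
--         visited[node] = level
--         for neigh in graph.get(node, []):
--             queue.append((neigh, level + 1))
--     return visited
-- ===== SOURCE B (Python) =====
-- def bfs(source_set, graph):
--     visited = {}
--     frontier = list(source_set)
--     level = 0
--     while frontier:
--         next_frontier = []
--         for node in frontier:
--             if node in visited: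
--                 continue
--             visited[node] = level
--             next_frontier.extend(graph.get(node, []))
--         frontier = next_frontier
--         level += 1
--     return visited
-- ===== Notes on version B (the rewrite author's own statement) =====
-- stated objective: alternative
-- what changed: Replaces A's single FIFO deque of (node, level) pairs by a level-synchronous wavefront BFS: an outer loop per level with an explicit frontier/next-frontier list, visited checked when a node is processed so duplicates and levels come out identically.
import Mathlib
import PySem

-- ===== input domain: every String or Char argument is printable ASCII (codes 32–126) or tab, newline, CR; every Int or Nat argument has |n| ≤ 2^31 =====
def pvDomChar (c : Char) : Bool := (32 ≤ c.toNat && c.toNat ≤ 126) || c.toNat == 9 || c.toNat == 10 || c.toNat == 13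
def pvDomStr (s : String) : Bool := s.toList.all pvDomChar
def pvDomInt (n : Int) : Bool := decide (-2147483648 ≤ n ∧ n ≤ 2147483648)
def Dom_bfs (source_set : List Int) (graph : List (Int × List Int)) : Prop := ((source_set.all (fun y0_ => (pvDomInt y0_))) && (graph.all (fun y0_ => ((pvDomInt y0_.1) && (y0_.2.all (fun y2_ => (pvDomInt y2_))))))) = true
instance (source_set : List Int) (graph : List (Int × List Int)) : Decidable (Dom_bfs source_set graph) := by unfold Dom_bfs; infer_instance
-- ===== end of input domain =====

-- B replaces A's single node-level deque by a level-synchronous wavefront loop (frontier list per level); objective: alternative decomposition, same values.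

-- ===== PORT A =====
-- termination helper lemmas (cited by name in decreasing_by of the loops below)
theorem pv_countP_lt {α : Type} (l : List α) (p p' : α → Bool) (x : α)
    (hx : x ∈ l) (hpx : p x = true) (hp'x : p' x = false)
    (hmono : ∀ a, p' a = true → p a = true) :
    l.countP p' < l.countP p := by
  induction l with
  | nil => cases hx
  | cons a t ih =>
    simp only [List.countP_cons]
    rcases List.mem_cons.mp hx with rfl | hxt
    · have h1 : t.countP p' ≤ t.countP p := List.countP_mono_left (fun a _ h => hmono a h)
      simp only [hpx, hp'x, Bool.false_eq_true, if_true, if_false]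
      omega
    · have := ih hxt
      have h2 : (if p' a then 1 else 0) ≤ (if p a then 1 else 0) := by
        by_cases h : p' a = true
        · simp [h, hmono a h]
        · simp only [Bool.not_eq_true] at h
          simp only [h, Bool.false_eq_true, if_false]
          omega
      omega

theorem pv_countP_insert_lt (g : PySem.Dict Int (List Int)) (v : PySem.Dict Int Int)
    (node lvl : Int) (hk : g.contains node = true) (hv : v.contains node = false) :
    (g.keys.countP fun k => !((v.insert node lvl).contains k)) <
      (g.keys.countP fun k => !(v.contains k)) := by
  apply pv_countP_lt _ _ _ node
  · exact (PySem.Dict.contains_iff_mem_keys g node).mp hk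
  · simp [hv]
  · simp [PySem.Dict.contains_insert_self]
  · intro a ha
    rw [PySem.Dict.contains_insert] at ha
    simp only [Bool.not_eq_true'] at ha ⊢
    exact (Bool.or_eq_false_iff.mp ha).2

theorem pv_countP_insert_not_mem (g : PySem.Dict Int (List Int)) (v : PySem.Dict Int Int)
    (node lvl : Int) (hk : g.contains node = false) :
    (g.keys.countP fun k => !((v.insert node lvl).contains k)) =
      (g.keys.countP fun k => !(v.contains k)) := by
  apply List.countP_congr
  intro a ha
  have hne : a ≠ node := by
    rintro rfl
    rw [(PySem.Dict.contains_iff_mem_keys g a).mpr ha] at hk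
    cases hk
  rw [PySem.Dict.contains_insert]
  simp [hne]

-- literal port of A: one FIFO queue of (node, level) pairs, skip visited on pop
def loopA (g : PySem.Dict Int (List Int)) (q : List (Int × Int)) (v : PySem.Dict Int Int) :
    PySem.Dict Int Int :=
  match q with
  | [] => v
  | (node, level) :: rest =>
    if h : v.contains node = true then loopA g rest v
    else loopA g (rest ++ (g.getD node []).map (fun n => (n, level + 1))) (v.insert node level)
termination_by ((g.keys.countP fun k => !(v.contains k)), q.length)
decreasing_by
  · exact Prod.Lex.right _ (by simp)
  · simp only [Bool.not_eq_true] at h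
    by_cases hk : g.contains node = true
    · exact Prod.Lex.left _ _ (pv_countP_insert_lt g v node level hk h)
    · simp only [Bool.not_eq_true] at hk
      rw [PySem.Dict.getD_of_not_contains g [] hk]
      rw [pv_countP_insert_not_mem g v node level hk]
      exact Prod.Lex.right _ (by simp)

def bfs (source_set : List Int) (graph : List (Int × List Int)) : List (Int × Int) :=
  (loopA (PySem.Dict.mk graph) (source_set.map (fun s => (s, (0 : Int)))) PySem.Dict.empty).items

-- ===== PORT B =====
-- B's inner for-loop over one frontier: state = (visited, next_frontier)
def bfsInner (g : PySem.Dict Int (List Int)) (level : Int) :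
    List Int → PySem.Dict Int Int × List Int → PySem.Dict Int Int × List Int
  | [], st => st
  | node :: rest, st =>
    if st.1.contains node then bfsInner g level rest st
    else bfsInner g level rest (st.1.insert node level, st.2 ++ g.getD node [])

theorem pv_inner_mono (g : PySem.Dict Int (List Int)) (level : Int) :
    ∀ (xs : List Int) (st : PySem.Dict Int Int × List Int) (k : Int),
      st.1.contains k = true → ((bfsInner g level xs st).1).contains k = true := by
  intro xs
  induction xs with
  | nil => intro st k h; simpa [bfsInner] using h
  | cons x t ih =>
    intro st k h
    rw [bfsInner]
    split
    · exact ih st k h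
    · apply ih
      simp only
      rw [PySem.Dict.contains_insert]
      simp [h]

theorem pv_inner_dec (g : PySem.Dict Int (List Int)) (level : Int) :
    ∀ (xs : List Int) (st : PySem.Dict Int Int × List Int),
      (g.keys.countP fun k => !(((bfsInner g level xs st).1).contains k)) <
          (g.keys.countP fun k => !(st.1.contains k)) ∨
        ((g.keys.countP fun k => !(((bfsInner g level xs st).1).contains k)) =
          (g.keys.countP fun k => !(st.1.contains k)) ∧
          (bfsInner g level xs st).2 = st.2) := by
  intro xs
  induction xs with
  | nil => intro st; right; simp [bfsInner]
  | cons x t ih =>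
    intro st
    rw [bfsInner]
    by_cases hc : st.1.contains x = true
    · simp only [hc, if_true]
      exact ih st
    · simp only [Bool.not_eq_true] at hc
      simp only [hc, Bool.false_eq_true, if_false]
      by_cases hk : g.contains x = true
      · left
        have h1 : (g.keys.countP fun k =>
              !((bfsInner g level t (st.1.insert x level, st.2 ++ g.getD x [])).1).contains k) ≤
            (g.keys.countP fun k => !((st.1.insert x level).contains k)) := by
          apply List.countP_mono_left
          intro a _ h
          by_contra hcon
          have hcc : (st.1.insert x level).contains a = true := by
            cases hcc : (st.1.insert x level).contains a
            · exact absurd (by simp [hcc]) hcon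
            · rfl
          have := pv_inner_mono g level t (st.1.insert x level, st.2 ++ g.getD x []) a hcc
          rw [this] at h; cases h
        have h2 := pv_countP_insert_lt g st.1 x level hk hc
        omega
      · simp only [Bool.not_eq_true] at hk
        rw [PySem.Dict.getD_of_not_contains g [] hk, List.append_nil]
        have heq := pv_countP_insert_not_mem g st.1 x level hk
        rcases ih (st.1.insert x level, st.2) with h | ⟨h1, h2⟩
        · left; simp only at h; omega
        · right
          refine ⟨?_, h2⟩
          simp only at h1
          omega

-- literal port of B: level-synchronous wavefront loop
def loopB (g : PySem.Dict Int (List Int)) (frontier : List Int) (v : PySem.Dict Int Int)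
    (level : Int) : PySem.Dict Int Int :=
  if h : frontier.isEmpty then v
  else
    loopB g (bfsInner g level frontier (v, [])).2 (bfsInner g level frontier (v, [])).1
      (level + 1)
termination_by ((g.keys.countP fun k => !(v.contains k)), frontier.length)
decreasing_by
  rcases pv_inner_dec g level frontier (v, []) with hlt | ⟨heq, hnil⟩
  · exact Prod.Lex.left _ _ hlt
  · simp only at hnil heq
    rw [hnil, heq]
    apply Prod.Lex.right
    simp only [List.length_nil]
    cases frontier with
    | nil => simp at h
    | cons a t => simp

def bfs_alt (source_set : List Int) (graph : List (Int × List Int)) : List (Int × Int) :=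
  (loopB (PySem.Dict.mk graph) source_set PySem.Dict.empty 0).items

-- ===== PRECONDITION & SPEC =====
def Spec_bfs (source_set : List Int) (graph : List (Int × List Int)) (out : List (Int × Int)) : Prop := out = bfs_alt source_set graph
instance (source_set : List Int) (graph : List (Int × List Int)) (out : List (Int × Int)) : Decidable (Spec_bfs source_set graph out) := by unfold Spec_bfs; infer_instance

-- ===== CLAIM (what is proved, stated in full; the proofs are below) =====
def Claim_equal_bfs : Prop := ∀ (source_set : List Int) (graph : List (Int × List Int)), Dom_bfs source_set graph → Spec_bfs source_set graph (bfs source_set graph)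

-- ===== LEMMAS AND PROOFS =====
theorem loopA_nil (g : PySem.Dict Int (List Int)) (v : PySem.Dict Int Int) :
    loopA g [] v = v := by rw [loopA]

theorem loopA_cons (g : PySem.Dict Int (List Int)) (node level : Int) (rest : List (Int × Int))
    (v : PySem.Dict Int Int) :
    loopA g ((node, level) :: rest) v =
      if v.contains node = true then loopA g rest v
      else loopA g (rest ++ (g.getD node []).map (fun n => (n, level + 1))) (v.insert node level) := by
  rw [loopA]
  by_cases hcc : v.contains node = true <;> simp [hcc]

theorem loopB_step (g : PySem.Dict Int (List Int)) (frontier : List Int) (v : PySem.Dict Int Int)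
    (level : Int) (h : frontier.isEmpty = false) :
    loopB g frontier v level =
      loopB g (bfsInner g level frontier (v, [])).2 (bfsInner g level frontier (v, [])).1
        (level + 1) := by
  rw [loopB]; simp [h]

-- one level of A's queue processing equals one pass of B's inner loop
theorem pv_level (g : PySem.Dict Int (List Int)) (l : Int) :
    ∀ (xs : List Int) (v : PySem.Dict Int Int) (ys : List Int),
      loopA g (xs.map (fun x => (x, l)) ++ ys.map (fun x => (x, l + 1))) v =
        loopA g (((bfsInner g l xs (v, ys)).2).map (fun x => (x, l + 1)))
          ((bfsInner g l xs (v, ys)).1) := by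
  intro xs
  induction xs with
  | nil => intro v ys; simp [bfsInner]
  | cons x t ih =>
    intro v ys
    simp only [List.map_cons, List.cons_append]
    rw [loopA_cons, bfsInner]
    by_cases hc : v.contains x = true
    · simp only [hc, if_true]
      exact ih v ys
    · simp only [Bool.not_eq_true] at hc
      simp only [hc, Bool.false_eq_true, if_false]
      have harr : (t.map (fun x => (x, l)) ++ ys.map (fun x => (x, l + 1))) ++
          (g.getD x []).map (fun n => (n, l + 1)) =
          t.map (fun x => (x, l)) ++ (ys ++ g.getD x []).map (fun x => (x, l + 1)) := by
        simp [List.map_append]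
      rw [harr]
      exact ih (v.insert x l) (ys ++ g.getD x [])

theorem pv_loops_eq (g : PySem.Dict Int (List Int)) :
    ∀ (frontier : List Int) (v : PySem.Dict Int Int) (level : Int),
      loopA g (frontier.map (fun x => (x, level))) v = loopB g frontier v level := by
  intro frontier v level
  induction frontier, v, level using loopB.induct g with
  | case1 frontier v level h =>
    have : frontier = [] := by simpa [List.isEmpty_iff] using h
    subst this
    rw [loopB]
    simp [loopA_nil]
  | case2 frontier v level h ih =>
    rw [loopB_step g frontier v level (by simpa using h)]
    rw [← ih]
    have := pv_level g level frontier v []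
    simpa using this

-- ===== VERDICT (by name: the statement is the Claim_ definition above) =====
theorem bfs_spec : Claim_equal_bfs := by
  intro source_set graph _
  unfold Spec_bfs bfs bfs_alt
  exact congrArg PySem.Dict.items (pv_loops_eq (PySem.Dict.mk graph) source_set PySem.Dict.empty 0)
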